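-- pv_equiv track=rewrite | github.com/MarcusHunt090/nlp-finance | app.py | apply_negation
-- ===== SOURCE A (Python) =====
-- NEGATION_WORDS = {'not', 'no', 'nor', 'never', 'neither', "n't", 'nobody',
--                   'nothing', 'nowhere', 'hardly', 'barely', 'scarcely'}
--
-- NEGATION_END = {'.', ',', '!', '?', ';', ':', 'but', 'however', 'though'}
--
-- def apply_negation(tokens):
--     result = []
--     negating = False
--     for token in tokens:
--         lower = token.lower()
--         if lower in NEGATION_WORDS or lower.endswith("n't"):
--             negating = True
--             result.append(token)
--         elif lower in NEGATION_END:
--             negating = False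
--             result.append(token)
--         elif negating:
--             result.append(f"NOT_{token}")
--         else:
--             result.append(token)
--     return result
-- ===== SOURCE B (Python) =====
-- NEGATION_WORDS = {'not', 'no', 'nor', 'never', 'neither', "n't", 'nobody',
--                   'nothing', 'nowhere', 'hardly', 'barely', 'scarcely'}
--
-- NEGATION_END = {'.', ',', '!', '?', ';', ':', 'but', 'however', 'though'}
--
--
-- def _is_trigger(token):
--     low = token.lower()
--     return low in NEGATION_WORDS or low.endswith("n't")
--
--
-- def _process_segment(seg):
--     k = next((i for i, t in enumerate(seg) if _is_trigger(t)), len(seg))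
--     return seg[:k + 1] + [t if _is_trigger(t) else f"NOT_{t}" for t in seg[k + 1:]]
--
--
-- def apply_negation(tokens):
--     result = []
--     seg = []
--     for token in tokens:
--         if token.lower() in NEGATION_END:
--             result.extend(_process_segment(seg))
--             result.append(token)
--             seg = []
--         else:
--             seg.append(token)
--     result.extend(_process_segment(seg))
--     return result
-- ===== Notes on version B (the rewrite author's own statement) =====
-- stated objective: alternative
-- what changed: Replaces the running negating-flag state machine with a segment decomposition: the token list is split at NEGATION_END tokens, each segment is processed by finding its first negation trigger and mapping the NOT_ prefix over the tail after it.
import Mathlib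
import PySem

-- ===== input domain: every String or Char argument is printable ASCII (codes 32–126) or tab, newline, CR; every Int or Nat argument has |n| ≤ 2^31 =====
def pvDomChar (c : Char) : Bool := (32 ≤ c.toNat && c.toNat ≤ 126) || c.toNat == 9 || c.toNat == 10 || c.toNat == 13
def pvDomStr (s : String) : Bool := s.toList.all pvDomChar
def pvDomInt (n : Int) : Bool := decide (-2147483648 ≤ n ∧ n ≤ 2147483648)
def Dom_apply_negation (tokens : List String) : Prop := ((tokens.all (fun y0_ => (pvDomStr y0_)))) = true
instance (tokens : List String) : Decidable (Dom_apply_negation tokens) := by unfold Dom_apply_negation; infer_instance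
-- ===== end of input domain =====

-- B replaces A's running-flag state machine by a segment decomposition (split at END tokens,
-- find the first trigger per segment, prefix the tail); same O(n) cost, alternative structure.

def negWords : PySem.Set String :=
  PySem.Set.ofList ["not", "no", "nor", "never", "neither", "n't", "nobody",
                    "nothing", "nowhere", "hardly", "barely", "scarcely"]

def negEnds : PySem.Set String :=
  PySem.Set.ofList [".", ",", "!", "?", ";", ":", "but", "however", "though"]

-- trigger / end tests on the ALREADY-lowered token (A computes `lower` once and tests it twice)
def isTrigL (l : String) : Bool := PySem.Set.contains negWords l || PySem.Str.endswith l "n't"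

def isEndL (l : String) : Bool := PySem.Set.contains negEnds l

-- ===== PORT A =====
def stepA (st : List String × Bool) (token : String) : List String × Bool :=
  let lower := PySem.Str.lower token
  if isTrigL lower then (st.1 ++ [token], true)
  else if isEndL lower then (st.1 ++ [token], false)
  else if st.2 then (st.1 ++ ["NOT_" ++ token], st.2)
  else (st.1 ++ [token], st.2)

def apply_negation (tokens : List String) : List String :=
  (tokens.foldl stepA ([], false)).1

-- ===== PORT B =====
def isTrig (token : String) : Bool := isTrigL (PySem.Str.lower token)

-- _process_segment: k = index of first trigger (len(seg) if none); keep seg[:k+1], prefix the rest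
def procSeg (seg : List String) : List String :=
  let k := seg.findIdx isTrig
  seg.take (k + 1) ++ (seg.drop (k + 1)).map (fun t => if isTrig t then t else "NOT_" ++ t)

def goB : List String → List String → List String
  | seg, [] => procSeg seg
  | seg, token :: rest =>
      if isEndL (PySem.Str.lower token) then procSeg seg ++ token :: goB [] rest
      else goB (seg ++ [token]) rest

def apply_negation_alt (tokens : List String) : List String := goB [] tokens

-- ===== PRECONDITION & SPEC =====
def Spec_apply_negation (tokens : List String) (out : List String) : Prop := out = apply_negation_alt tokens
instance (tokens : List String) (out : List String) : Decidable (Spec_apply_negation tokens out) := by unfold Spec_apply_negation; infer_instance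

-- ===== CLAIM (what is proved, stated in full; the proofs are below) =====
def Claim_equal_apply_negation : Prop := ∀ (tokens : List String), Dom_apply_negation tokens → Spec_apply_negation tokens (apply_negation tokens)

-- ===== LEMMAS AND PROOFS =====

-- A's loop, written as a direct recursion producing the output from state `neg`
def runA : Bool → List String → List String
  | _, [] => []
  | neg, t :: ts =>
      let l := PySem.Str.lower t
      if isTrigL l then t :: runA true ts
      else if isEndL l then t :: runA false ts
      else if neg then ("NOT_" ++ t) :: runA neg ts
      else t :: runA neg ts

theorem foldA (ts : List String) : ∀ (acc : List String) (neg : Bool),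
    (ts.foldl stepA (acc, neg)).1 = acc ++ runA neg ts := by
  induction ts with
  | nil => intro acc neg; simp [runA]
  | cons t ts ih =>
      intro acc neg
      simp only [List.foldl_cons, stepA, runA]
      split_ifs <;> simp [ih]

theorem end_not_trig (l : String) (h : isEndL l = true) : isTrigL l = false := by
  have hm : l ∈ [".", ",", "!", "?", ";", ":", "but", "however", "though"] := by
    simpa [isEndL, negEnds, PySem.Set.contains] using h
  fin_cases hm <;> decide

theorem procSeg_of_le (seg : List String) (h : seg.length ≤ seg.findIdx isTrig + 1) :
    procSeg seg = seg := by
  simp [procSeg, List.take_of_length_le h, List.drop_eq_nil_of_le h]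

theorem procSeg_no_trig (seg : List String) (h : ∀ t ∈ seg, isTrig t = false) :
    procSeg seg = seg := by
  have hk : seg.findIdx isTrig = seg.length := by
    rw [List.findIdx_eq_length]
    intro x hx; simp [h x hx]
  exact procSeg_of_le seg (by omega)

theorem findIdx_append_no_trig (seg : List String) (t : String)
    (h : ∀ x ∈ seg, isTrig x = false) (ht : isTrig t = true) :
    (seg ++ [t]).findIdx isTrig = seg.length := by
  induction seg with
  | nil => simp [List.findIdx_cons, ht]
  | cons x xs ih =>
      have hx : isTrig x = false := h x (by simp)
      simp [List.findIdx_cons, hx, ih (fun y hy => h y (by simp [hy]))]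

theorem procSeg_append_no_trig (seg : List String) (t : String)
    (h : ∀ x ∈ seg, isTrig x = false) :
    procSeg (seg ++ [t]) = seg ++ [t] := by
  by_cases ht : isTrig t = true
  · have hk := findIdx_append_no_trig seg t h ht
    exact procSeg_of_le _ (by simp [hk])
  · exact procSeg_no_trig _ (by
      intro x hx
      rcases List.mem_append.mp hx with hx | hx
      · exact h x hx
      · simp at hx; subst hx; simpa using ht)

theorem findIdx_append_lt (seg l2 : List String) (h : seg.findIdx isTrig < seg.length) :
    (seg ++ l2).findIdx isTrig = seg.findIdx isTrig := by
  induction seg with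
  | nil => simp at h
  | cons x xs ih =>
      by_cases hx : isTrig x = true
      · simp [List.findIdx_cons, hx]
      · have hx' : isTrig x = false := by simpa using hx
        simp only [List.cons_append, List.findIdx_cons, hx', cond_false, List.length_cons] at h ⊢
        have := ih (by omega)
        omega

theorem procSeg_append_trig (seg : List String) (t : String)
    (h : seg.findIdx isTrig < seg.length) :
    procSeg (seg ++ [t]) = procSeg seg ++ [if isTrig t then t else "NOT_" ++ t] := by
  have hk := findIdx_append_lt seg [t] h
  have hle : seg.findIdx isTrig + 1 ≤ seg.length := h
  rw [procSeg, procSeg, hk]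
  rw [List.take_append_of_le_length hle, List.drop_append_of_le_length hle]
  simp

theorem goB_runA (ts : List String) : ∀ seg : List String,
    goB seg ts = if seg.any isTrig then procSeg seg ++ runA true ts
                 else seg ++ runA false ts := by
  induction ts with
  | nil =>
      intro seg
      by_cases h : seg.any isTrig = true
      · simp [goB, h, runA]
      · simp [goB, h, runA, procSeg_no_trig seg (by
          intro t ht
          by_contra hc
          exact h (List.any_eq_true.mpr ⟨t, ht, by simpa using hc⟩))]
  | cons t ts ih =>
      intro seg
      by_cases he : isEndL (PySem.Str.lower t) = true
      · have hnt : isTrigL (PySem.Str.lower t) = false := end_not_trig _ he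
        have hgo : goB [] ts = runA false ts := by simpa using ih []
        by_cases h : seg.any isTrig = true
        · simp [goB, he, h, runA, hnt, hgo]
        · simp [goB, he, h, runA, hnt, hgo, procSeg_no_trig seg (by
            intro x hx
            by_contra hc
            exact h (List.any_eq_true.mpr ⟨x, hx, by simpa using hc⟩))]
      · by_cases h : seg.any isTrig = true
        · have hlt : seg.findIdx isTrig < seg.length :=
            List.findIdx_lt_length.mpr (List.any_eq_true.mp h)
          have : (seg ++ [t]).any isTrig = true := by simp [List.any_append, h]
          rw [goB]; simp only [he]
          rw [ih (seg ++ [t]), if_pos this, procSeg_append_trig seg t hlt]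
          by_cases ht : isTrig t = true
          · have : isTrigL (PySem.Str.lower t) = true := by simpa [isTrig] using ht
            simp [h, runA, this, ht]
          · have : isTrigL (PySem.Str.lower t) = false := by simpa [isTrig] using ht
            simp [h, runA, this, ht, he]
        · have hns : ∀ x ∈ seg, isTrig x = false := by
            intro x hx; by_contra hc
            exact h (List.any_eq_true.mpr ⟨x, hx, by simpa using hc⟩)
          rw [goB]; simp only [he]
          rw [ih (seg ++ [t])]
          by_cases ht : isTrig t = true
          · have hT : isTrigL (PySem.Str.lower t) = true := by simpa [isTrig] using ht
            have : (seg ++ [t]).any isTrig = true := by simp [List.any_append, ht]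
            rw [if_pos this, procSeg_append_no_trig seg t hns]
            simp [h, runA, hT]
          · have hT : isTrigL (PySem.Str.lower t) = false := by simpa [isTrig] using ht
            have hT2 : isTrig t = false := by simpa using ht
            have hseg : seg.any isTrig = false := by simpa using h
            have hat : (seg ++ [t]).any isTrig = false := by
              simp [List.any_append, hseg, hT2]
            simp only [hat, hseg, Bool.false_eq_true, if_false]
            simp [runA, hT, he]

-- ===== VERDICT (by name: the statement is the Claim_ definition above) =====
theorem apply_negation_spec : Claim_equal_apply_negation := by
  intro tokens _
  show apply_negation tokens = apply_negation_alt tokens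
  rw [apply_negation, apply_negation_alt, foldA, goB_runA]
  simp
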